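-- pv_equiv track=rewrite | github.com/mono-1729/Atcoder | ABC/281/f.py | solve
-- ===== SOURCE A (Python) =====
-- exp=[1<<i for i in range(30)]
--
-- def solve(s,digit):
--   if digit==-1:
--       return 0
--   ones=set()
--   zeros=set()
--   for i in s:
--       if i&exp[digit]:
--           ones.add(i)
--       else:
--           zeros.add(i)
--   if len(ones)==0 or len(zeros)==0:
--       return solve(s,digit-1)
--   else:
--       return exp[digit]+min(solve(ones,digit-1),solve(zeros,digit-1))
-- ===== SOURCE B (Python) =====
-- exp=[1<<i for i in range(30)]
--
-- def solve(s, digit):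
--     # Build an explicit binary trie of the numbers (bits digit..0), then DFS over nodes.
--     def insert(t, x, d):
--         if t is None:
--             t = [None, None]
--         if d < 0:
--             return t
--         b = 1 if x & exp[d] else 0
--         c = list(t)
--         c[b] = insert(c[b], x, d - 1)
--         return c
--     root = [None, None]
--     for x in s:
--         root = insert(root, x, digit)
--     def dfs(t, d):
--         if d < 0 or t is None:
--             return 0
--         c0, c1 = t
--         if c0 is not None and c1 is not None:
--             return exp[d] + min(dfs(c0, d - 1), dfs(c1, d - 1))
--         if c0 is not None:
--             return dfs(c0, d - 1)
--         if c1 is not None: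
--             return dfs(c1, d - 1)
--         return 0
--     return dfs(root, digit)
-- ===== Notes on version B (the rewrite author's own statement) =====
-- stated objective: alternative
-- what changed: B materializes an explicit binary trie (nodes with 0/1 children built by per-bit insertion) and computes the answer by a DFS over trie nodes, instead of A's recursion that repeatedly partitions sets of numbers by the current bit.
-- outside the precondition, e.g. on solve(set(), 30): A returns 0, B returns 0
import Mathlib
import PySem

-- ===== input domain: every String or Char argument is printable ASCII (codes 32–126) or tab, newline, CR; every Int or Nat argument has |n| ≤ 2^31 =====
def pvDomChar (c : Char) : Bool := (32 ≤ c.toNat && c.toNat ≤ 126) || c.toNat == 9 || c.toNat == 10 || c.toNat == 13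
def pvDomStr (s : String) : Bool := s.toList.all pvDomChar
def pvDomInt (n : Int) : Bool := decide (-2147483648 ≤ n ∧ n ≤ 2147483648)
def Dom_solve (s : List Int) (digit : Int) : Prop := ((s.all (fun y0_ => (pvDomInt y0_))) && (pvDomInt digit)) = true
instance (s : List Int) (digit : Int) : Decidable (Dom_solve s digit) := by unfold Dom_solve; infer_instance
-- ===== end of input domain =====

-- B computes the answer over an explicit binary trie (build once, then DFS over nodes)
-- instead of A's recursive set partitioning; objective: alternative (data-structure change).

-- ===== PORT A =====
-- exp = [1 << i for i in range(30)]   (module constant of both files)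
def expList : List Int := (PySem.List.pyRange 0 30 1).map (fun i => (1 : Int) <<< i.toNat)

-- Port of A. The Nat fuel (d + 1).toNat only makes the recursion on 'digit' structural:
-- fuel 0 is exactly Python's 'digit == -1' base case (for digit < -1 Python recurses
-- forever; those inputs are outside Pre_solve).
def solveGo (s : List Int) (digit : Int) : Nat → Int
  | 0 => 0
  | fuel + 1 =>
    let e := (PySem.List.pyGet? expList digit).getD 0
    let p := s.foldl
      (fun (p : PySem.Set Int × PySem.Set Int) i =>
        if PySem.Int.band i e ≠ 0 then (PySem.Set.add p.1 i, p.2) else (p.1, PySem.Set.add p.2 i))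
      (PySem.Set.empty, PySem.Set.empty)
    if PySem.Set.len p.1 = 0 ∨ PySem.Set.len p.2 = 0 then solveGo s (digit - 1) fuel
    else e + min (solveGo p.1 (digit - 1) fuel) (solveGo p.2 (digit - 1) fuel)

def solve (s : List Int) (digit : Int) : Int := solveGo s digit (digit + 1).toNat

-- ===== PORT B =====
-- trie node: [c0, c1] (a Python pair-list); Trie.empty is Python's None
inductive Trie : Type
  | empty : Trie
  | node : Trie → Trie → Trie
deriving DecidableEq, Repr

-- insert(t, x, d) of Source B: 'if t is None: t = [None, None]' then descend on bit d;
-- the Nat fuel (d + 1).toNat only makes the recursion on d structural (fuel 0 = 'd < 0')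
def insertGo (t : Trie) (x : Int) (d : Int) : Nat → Trie
  | 0 =>
    .node (match t with | .empty => Trie.empty | .node a _ => a)
          (match t with | .empty => Trie.empty | .node _ b => b)
  | fuel + 1 =>
    let c0 := match t with | .empty => Trie.empty | .node a _ => a
    let c1 := match t with | .empty => Trie.empty | .node _ b => b
    if PySem.Int.band x ((PySem.List.pyGet? expList d).getD 0) ≠ 0 then
      .node c0 (insertGo c1 x (d - 1) fuel)
    else
      .node (insertGo c0 x (d - 1) fuel) c1

def insertT (t : Trie) (x : Int) (d : Int) : Trie := insertGo t x d (d + 1).toNat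

-- dfs(t, d) of Source B
def dfs (t : Trie) (d : Int) : Int :=
  if d < 0 then 0
  else match t with
  | .empty => 0
  | .node c0 c1 =>
    match c0, c1 with
    | .empty, .empty => 0
    | .empty, .node a b => dfs (.node a b) (d - 1)
    | .node a b, .empty => dfs (.node a b) (d - 1)
    | .node a b, .node a' b' =>
        (PySem.List.pyGet? expList d).getD 0 +
          min (dfs (.node a b) (d - 1)) (dfs (.node a' b') (d - 1))

def solve_alt (s : List Int) (digit : Int) : Int :=
  dfs (s.foldl (fun t x => insertT t x digit) (.node .empty .empty)) digit

-- ===== PRECONDITION & SPEC =====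
-- Pre_solve keeps digit in [-1, 29]: for digit < -1 Python A recurses forever (RecursionError),
-- and for digit ≥ 30 it raises IndexError (exp[digit]) on any nonempty s; the corner s = [] with
-- digit ≥ 30, where A just walks down and returns 0 (until the recursion limit) and B returns 0
-- as well, is excluded together with the other out-of-range digits.
def Pre_solve (s : List Int) (digit : Int) : Prop := -1 ≤ digit ∧ digit ≤ 29
instance (s : List Int) (digit : Int) : Decidable (Pre_solve s digit) := by unfold Pre_solve; infer_instance
def pvWitness_solve : List Int × Int := ([3, 5, 1], 3)

def Spec_solve (s : List Int) (digit : Int) (out : Int) : Prop := out = solve_alt s digit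
instance (s : List Int) (digit : Int) (out : Int) : Decidable (Spec_solve s digit out) := by unfold Spec_solve; infer_instance

-- ===== CLAIM (what is proved, stated in full; the proofs are below) =====
def Claim_equal_solve : Prop := ∀ (s : List Int) (digit : Int), Dom_solve s digit → Pre_solve s digit → Spec_solve s digit (solve s digit)

-- ===== LEMMAS AND PROOFS =====

-- the bit test both programs perform at level d (A: 'i & exp[digit]', B: 'x & exp[d]')
def bitB (x d : Int) : Bool := PySem.Int.band x ((PySem.List.pyGet? expList d).getD 0) ≠ 0

-- common reference: A's partition recursion written with list filters
def refGGo (l : List Int) (d : Int) : Nat → Int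
  | 0 => 0
  | fuel + 1 =>
    let on := l.filter (fun x => bitB x d)
    let ze := l.filter (fun x => !bitB x d)
    if on = [] ∨ ze = [] then refGGo l (d - 1) fuel
    else (PySem.List.pyGet? expList d).getD 0 +
      min (refGGo on (d - 1) fuel) (refGGo ze (d - 1) fuel)

def refG (l : List Int) (d : Int) : Int := refGGo l d (d + 1).toNat

theorem fuel_step {d : Int} (hd : ¬ d < 0) : (d + 1).toNat = (d - 1 + 1).toNat + 1 := by omega

theorem refG_neg {d : Int} (l : List Int) (hd : d < 0) : refG l d = 0 := by
  unfold refG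
  rw [show (d + 1).toNat = 0 by omega]
  rfl

theorem refG_pos {d : Int} (l : List Int) (hd : ¬ d < 0) :
    refG l d =
      if l.filter (fun x => bitB x d) = [] ∨ l.filter (fun x => !bitB x d) = [] then
        refG l (d - 1)
      else (PySem.List.pyGet? expList d).getD 0 +
        min (refG (l.filter (fun x => bitB x d)) (d - 1))
            (refG (l.filter (fun x => !bitB x d)) (d - 1)) := by
  unfold refG
  rw [fuel_step hd]
  rfl

theorem solve_neg (s : List Int) {digit : Int} (hd : digit ≤ -1) : solve s digit = 0 := by
  unfold solve
  rw [show (digit + 1).toNat = 0 by omega]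
  rfl

theorem solve_pos (s : List Int) {digit : Int} (hd : ¬ digit ≤ -1) :
    solve s digit =
      (let e := (PySem.List.pyGet? expList digit).getD 0
       let p := s.foldl
        (fun (p : PySem.Set Int × PySem.Set Int) i =>
          if PySem.Int.band i e ≠ 0 then (PySem.Set.add p.1 i, p.2) else (p.1, PySem.Set.add p.2 i))
        (PySem.Set.empty, PySem.Set.empty)
       if PySem.Set.len p.1 = 0 ∨ PySem.Set.len p.2 = 0 then solve s (digit - 1)
       else e + min (solve p.1 (digit - 1)) (solve p.2 (digit - 1))) := by
  unfold solve
  rw [fuel_step (by omega : ¬ digit < 0)]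
  rfl

theorem insertT_node {d : Int} (a b : Trie) (x : Int) (hd : ¬ d < 0) :
    insertT (.node a b) x d =
      if PySem.Int.band x ((PySem.List.pyGet? expList d).getD 0) ≠ 0 then
        .node a (insertT b x (d - 1))
      else .node (insertT a x (d - 1)) b := by
  unfold insertT
  rw [fuel_step hd]
  rfl

theorem refG_nil (d : Int) : refG [] d = 0 := by
  by_cases h : d < 0
  · exact refG_neg _ h
  · rw [refG_pos _ h]
    simp only [List.filter_nil]
    rw [if_pos (Or.inl trivial)]
    exact refG_nil (d - 1)
  termination_by (d + 1).toNat
  decreasing_by all_goals omega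

-- A's set-building loop produces (set of the 1-bit elements, set of the 0-bit elements)
theorem foldl_pair_eq (d : Int) (l : List Int) (a b : PySem.Set Int) :
    (l.foldl
      (fun (p : PySem.Set Int × PySem.Set Int) i =>
        if PySem.Int.band i ((PySem.List.pyGet? expList d).getD 0) ≠ 0 then
          (PySem.Set.add p.1 i, p.2)
        else (p.1, PySem.Set.add p.2 i))
      (a, b))
    = ((l.filter (fun x => bitB x d)).foldl PySem.Set.add a,
       (l.filter (fun x => !bitB x d)).foldl PySem.Set.add b) := by
  induction l generalizing a b with
  | nil => simp
  | cons x xs ih =>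
    by_cases hb : bitB x d
    · have hx : PySem.Int.band x ((PySem.List.pyGet? expList d).getD 0) ≠ 0 := by
        simpa [bitB] using hb
      rw [List.foldl_cons, if_pos hx, ih, List.filter_cons, List.filter_cons]
      simp [hb]
    · have hx : ¬ PySem.Int.band x ((PySem.List.pyGet? expList d).getD 0) ≠ 0 := by
        simpa [bitB] using hb
      rw [List.foldl_cons, if_neg hx, ih, List.filter_cons, List.filter_cons]
      simp [hb]

theorem solve_eq_refG : ∀ (n : Nat) (d : Int) (l l' : List Int), d + 1 ≤ n →
    (∀ x, x ∈ l ↔ x ∈ l') → solve l d = refG l' d := by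
  intro n
  induction n with
  | zero =>
    intro d l l' hn _
    rw [solve_neg l (by omega), refG_neg l' (by omega)]
  | succ n ih =>
    intro d l l' hn hmem
    by_cases hneg : d ≤ -1
    · rw [solve_neg l hneg, refG_neg l' (by omega)]
    · rw [solve_pos l hneg]
      simp only [foldl_pair_eq d l PySem.Set.empty PySem.Set.empty]
      rw [refG_pos l' (by omega : ¬ d < 0)]
      have hset : ∀ p : Int → Bool,
          (l.filter p).foldl PySem.Set.add PySem.Set.empty = PySem.Set.ofList (l.filter p) :=
        fun p => (PySem.Set.ofList_eq_foldl _).symm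
      have hnil : ∀ p : Int → Bool,
          (PySem.Set.ofList (l.filter p) = [] ↔ l'.filter p = []) := by
        intro p
        simp only [List.eq_nil_iff_forall_not_mem, PySem.Set.mem_ofList, List.mem_filter, hmem]
      have hmemf : ∀ p : Int → Bool, ∀ x : Int,
          (x ∈ PySem.Set.ofList (l.filter p) ↔ x ∈ l'.filter p) := by
        intro p x
        simp only [PySem.Set.mem_ofList, List.mem_filter, hmem]
      simp only [hset]
      by_cases hc : l'.filter (fun x => bitB x d) = [] ∨ l'.filter (fun x => !bitB x d) = []
      · rw [if_pos hc]
        have hcA : PySem.Set.len (PySem.Set.ofList (l.filter (fun x => bitB x d))) = 0 ∨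
            PySem.Set.len (PySem.Set.ofList (l.filter (fun x => !bitB x d))) = 0 := by
          rcases hc with hc | hc
          · exact Or.inl (by simp [PySem.Set.len, ((hnil _).mpr hc)])
          · exact Or.inr (by simp [PySem.Set.len, ((hnil _).mpr hc)])
        rw [if_pos hcA]
        exact ih (d - 1) l l' (by omega) hmem
      · rw [if_neg hc]
        have hcA : ¬ (PySem.Set.len (PySem.Set.ofList (l.filter (fun x => bitB x d))) = 0 ∨
            PySem.Set.len (PySem.Set.ofList (l.filter (fun x => !bitB x d))) = 0) := by
          push Not at hc ⊢
          constructor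
          · intro h; exact hc.1 ((hnil _).mp (by simpa [PySem.Set.len, List.length_eq_zero_iff] using h))
          · intro h; exact hc.2 ((hnil _).mp (by simpa [PySem.Set.len, List.length_eq_zero_iff] using h))
        rw [if_neg hcA]
        congr 1
        congr 1
        · exact ih (d - 1) _ _ (by omega) (hmemf _)
        · exact ih (d - 1) _ _ (by omega) (hmemf _)

theorem insertT_isNode (t : Trie) (x d : Int) : ∃ u v, insertT t x d = .node u v := by
  unfold insertT
  cases (d + 1).toNat with
  | zero => exact ⟨_, _, rfl⟩
  | succ fuel =>
    simp only [insertGo]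
    split
    · exact ⟨_, _, rfl⟩
    · exact ⟨_, _, rfl⟩

theorem insertT_empty (x d : Int) : insertT .empty x d = insertT (.node .empty .empty) x d := by
  unfold insertT
  cases (d + 1).toNat <;> rfl

theorem foldl_insert_isNode (d : Int) (l : List Int) (u v : Trie) :
    ∃ u' v', l.foldl (fun t x => insertT t x d) (.node u v) = .node u' v' := by
  induction l generalizing u v with
  | nil => exact ⟨u, v, rfl⟩
  | cons x xs ih =>
    rw [List.foldl_cons]
    obtain ⟨a, b, hab⟩ := insertT_isNode (.node u v) x d
    rw [hab]; exact ih a b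

theorem build_children (d : Int) (hd : ¬ d < 0) (l : List Int) (a b : Trie) :
    l.foldl (fun t x => insertT t x d) (.node a b)
    = .node ((l.filter (fun x => !bitB x d)).foldl (fun t x => insertT t x (d - 1)) a)
            ((l.filter (fun x => bitB x d)).foldl (fun t x => insertT t x (d - 1)) b) := by
  induction l generalizing a b with
  | nil => simp
  | cons x xs ih =>
    rw [List.foldl_cons, List.filter_cons, List.filter_cons]
    by_cases hb : bitB x d
    · have hx : PySem.Int.band x ((PySem.List.pyGet? expList d).getD 0) ≠ 0 := by
        simpa [bitB] using hb
      have hstep : insertT (.node a b) x d = .node a (insertT b x (d - 1)) := by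
        rw [insertT_node a b x hd, if_pos hx]
      rw [hstep, ih]
      simp [hb]
    · have hx : ¬ PySem.Int.band x ((PySem.List.pyGet? expList d).getD 0) ≠ 0 := by
        simpa [bitB] using hb
      have hstep : insertT (.node a b) x d = .node (insertT a x (d - 1)) b := by
        rw [insertT_node a b x hd, if_neg hx]
      rw [hstep, ih]
      simp [hb]

theorem foldl_empty_cons (d y : Int) (ys : List Int) :
    (y :: ys).foldl (fun t x => insertT t x d) .empty
    = (y :: ys).foldl (fun t x => insertT t x d) (.node .empty .empty) := by
  rw [List.foldl_cons, List.foldl_cons, insertT_empty]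

theorem dfs_eq_refG : ∀ (n : Nat) (d : Int) (l : List Int), d + 1 ≤ n →
    dfs (l.foldl (fun t x => insertT t x d) (.node .empty .empty)) d = refG l d := by
  intro n
  induction n with
  | zero =>
    intro d l hn
    obtain ⟨u, v, huv⟩ := foldl_insert_isNode d l .empty .empty
    rw [huv, refG_neg l (by omega), dfs.eq_def]
    simp [show d < 0 by omega]
  | succ n ih =>
    intro d l hn
    by_cases hd : d < 0
    · obtain ⟨u, v, huv⟩ := foldl_insert_isNode d l .empty .empty
      rw [huv, refG_neg l hd, dfs.eq_def]
      simp [hd]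
    · rw [build_children d hd l .empty .empty, refG_pos l hd]
      cases hc1 : l.filter (fun x => bitB x d) with
      | nil =>
        cases hc0 : l.filter (fun x => !bitB x d) with
        | nil =>
          -- both filters empty: l itself is empty
          have hl : l = [] := by
            rw [List.eq_nil_iff_forall_not_mem]
            intro x hx
            by_cases hb : bitB x d
            · have : x ∈ l.filter (fun x => bitB x d) := List.mem_filter.mpr ⟨hx, hb⟩
              rw [hc1] at this; exact absurd this (List.not_mem_nil)
            · have : x ∈ l.filter (fun x => !bitB x d) := List.mem_filter.mpr ⟨hx, by simpa using hb⟩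
              rw [hc0] at this; exact absurd this (List.not_mem_nil)
          subst hl
          rw [dfs.eq_def]
          simp [hd, refG_nil]
        | cons y ys =>
          -- ones empty, zeros nonempty: the single zero child is walked, skipping this bit
          obtain ⟨a, b, hab⟩ := foldl_insert_isNode (d - 1) (y :: ys) .empty .empty
          have hE : (y :: ys).foldl (fun t x => insertT t x (d - 1)) .empty = .node a b := by
            rw [foldl_empty_cons]; exact hab
          have hall : l.filter (fun x => !bitB x d) = l :=
            List.filter_eq_self.mpr (fun x hx => by
              simpa using List.filter_eq_nil_iff.mp hc1 x hx)
          have hly : l = y :: ys := hall.symm.trans hc0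
          have hih := ih (d - 1) (y :: ys) (by omega)
          rw [← foldl_empty_cons, hE] at hih
          have hstep : dfs ((Trie.node a b).node Trie.empty) d = dfs (.node a b) (d - 1) := by
            rw [dfs.eq_def]; simp [hd]
          rw [hE, List.foldl_nil, hstep, hih, hly]
          simp
      | cons y1 ys1 =>
        cases hc0 : l.filter (fun x => !bitB x d) with
        | nil =>
          -- zeros empty, ones nonempty: the single one child is walked, skipping this bit
          obtain ⟨a, b, hab⟩ := foldl_insert_isNode (d - 1) (y1 :: ys1) .empty .empty
          have hE : (y1 :: ys1).foldl (fun t x => insertT t x (d - 1)) .empty = .node a b := by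
            rw [foldl_empty_cons]; exact hab
          have hall : l.filter (fun x => bitB x d) = l :=
            List.filter_eq_self.mpr (fun x hx => by
              simpa using List.filter_eq_nil_iff.mp hc0 x hx)
          have hly : l = y1 :: ys1 := hall.symm.trans hc1
          have hih := ih (d - 1) (y1 :: ys1) (by omega)
          rw [← foldl_empty_cons, hE] at hih
          have hstep : dfs (Trie.empty.node (Trie.node a b)) d = dfs (.node a b) (d - 1) := by
            rw [dfs.eq_def]; simp [hd]
          rw [hE, List.foldl_nil, hstep, hih, hly]
          simp
        | cons y0 ys0 =>
          -- both children present: take this bit and recurse into both subtries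
          obtain ⟨a1, b1, hab1⟩ := foldl_insert_isNode (d - 1) (y1 :: ys1) .empty .empty
          have hE1 : (y1 :: ys1).foldl (fun t x => insertT t x (d - 1)) .empty = .node a1 b1 := by
            rw [foldl_empty_cons]; exact hab1
          obtain ⟨a0, b0, hab0⟩ := foldl_insert_isNode (d - 1) (y0 :: ys0) .empty .empty
          have hE0 : (y0 :: ys0).foldl (fun t x => insertT t x (d - 1)) .empty = .node a0 b0 := by
            rw [foldl_empty_cons]; exact hab0
          have hih1 := ih (d - 1) (y1 :: ys1) (by omega)
          rw [← foldl_empty_cons, hE1] at hih1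
          have hih0 := ih (d - 1) (y0 :: ys0) (by omega)
          rw [← foldl_empty_cons, hE0] at hih0
          have hstep : dfs ((Trie.node a0 b0).node (Trie.node a1 b1)) d
              = (PySem.List.pyGet? expList d).getD 0 +
                  min (dfs (.node a0 b0) (d - 1)) (dfs (.node a1 b1) (d - 1)) := by
            rw [dfs.eq_def]; simp [hd]
          rw [hE0, hE1, hstep, hih0, hih1]
          simp
          rw [min_comm]

-- ===== VERDICT (by name: the statement is the Claim_ definition above) =====
theorem solve_spec : Claim_equal_solve := by
  intro s digit _ hpre
  unfold Spec_solve
  have hA := solve_eq_refG ((digit + 1).toNat + 1) digit s s (by omega) (fun x => Iff.rfl)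
  have hB := dfs_eq_refG ((digit + 1).toNat + 1) digit s (by omega)
  unfold solve_alt
  rw [hA, hB]
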